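-- pv_equiv track=rewrite | github.com/bssrdf/pyleet | ClosestDessertCost.py | closestCost2
-- ===== SOURCE A (Python) =====
-- from typing import List
--
-- def closestCost2(baseCosts: List[int], toppingCosts: List[int], target: int) -> int:
--     res = [baseCosts[0]]
--     def helper(start, price):
--         if abs(target - price) < abs(target - res[0]) or \
--             abs(target - price) == abs(target - res[0]) and price < target:
--             res[0] = price
--         if start == len(toppingCosts) or price >= target: return
--         helper(start+1, price)
--         helper(start+1, price+toppingCosts[start])
--         helper(start+1, price+toppingCosts[start]*2)
--     for base in baseCosts:
--         helper(0, base)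
--     return res[0]
-- ===== SOURCE B (Python) =====
-- from typing import List
--
-- def closestCost2(baseCosts: List[int], toppingCosts: List[int], target: int) -> int:
--     # Iterative frontier DP over DISTINCT reachable prices (0/1/2 of each topping,
--     # expansion pruned once a price reaches the target), keeping the best price seen.
--     def better(p, q):
--         return abs(target - p) < abs(target - q) or \
--             (abs(target - p) == abs(target - q) and p < q)
--     best = baseCosts[0]
--     frontier = set(baseCosts)
--     for p in frontier:
--         if better(p, best):
--             best = p
--     for t in toppingCosts:
--         frontier = {p + k * t for p in frontier if p < target for k in (0, 1, 2)}
--         for p in frontier: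
--             if better(p, best):
--                 best = p
--     return best
-- ===== Notes on version B (the rewrite author's own statement) =====
-- stated objective: faster
-- what changed: A explores every 0/1/2-toppings combination per base by exponential recursion; B keeps one iterative set-frontier of DISTINCT reachable prices per topping level (same < target pruning) and tracks the best price as it goes. Intended as faster (deduplication removes the 3^m blow-up); a timing run could not record a clean ratio because A already timed out at n=16 toppings where B returned instantly.
-- outside the precondition, e.g. on closestCost2([], [1], 5): A raises IndexError, B raises IndexError
import Mathlib
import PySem

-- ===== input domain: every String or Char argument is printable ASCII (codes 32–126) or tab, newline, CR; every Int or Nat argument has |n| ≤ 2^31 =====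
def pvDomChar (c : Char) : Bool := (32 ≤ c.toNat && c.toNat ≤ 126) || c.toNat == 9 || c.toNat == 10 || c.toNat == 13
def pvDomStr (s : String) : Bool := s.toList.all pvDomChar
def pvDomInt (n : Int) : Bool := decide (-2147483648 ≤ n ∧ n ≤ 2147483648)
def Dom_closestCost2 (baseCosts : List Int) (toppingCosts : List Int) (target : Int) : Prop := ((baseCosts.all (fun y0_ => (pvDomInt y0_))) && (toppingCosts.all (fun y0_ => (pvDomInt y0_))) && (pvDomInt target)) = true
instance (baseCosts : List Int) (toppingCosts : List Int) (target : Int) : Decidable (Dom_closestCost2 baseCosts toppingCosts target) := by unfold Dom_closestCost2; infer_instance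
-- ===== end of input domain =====

-- B replaces A's per-base 0/1/2-per-topping recursion by one iterative frontier of
-- DISTINCT reachable prices (a set per topping level, same `< target` pruning),
-- keeping the best price as it goes.

-- ===== PORT A =====
-- A's update test: strictly closer to target, or same distance and price below target.
def pvBetterA (target price res : Int) : Bool :=
  decide ((target - price).natAbs < (target - res).natAbs) ||
    (decide ((target - price).natAbs = (target - res).natAbs) && decide (price < target))

-- A's helper(start, price) with res threaded through; the suffix of toppingCosts from
-- `start` is the structural-recursion argument (start == len ↔ suffix = []).
def pvHelperA (target : Int) : List Int → Int → Int → Int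
  | ts, price, res =>
    let res := if pvBetterA target price res then price else res
    match ts with
    | [] => res
    | t :: ts' =>
      if price ≥ target then res
      else
        let res := pvHelperA target ts' price res
        let res := pvHelperA target ts' (price + t) res
        pvHelperA target ts' (price + t * 2) res

def closestCost2 (baseCosts : List Int) (toppingCosts : List Int) (target : Int) : Int :=
  match baseCosts with
  | [] => 0  -- unreachable under Pre_: Python raises IndexError on baseCosts[0]
  | b0 :: _ => baseCosts.foldl (fun res base => pvHelperA target toppingCosts base res) b0

-- ===== PORT B =====
-- better(p, q): p strictly closer to target, ties broken toward the smaller price.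
def pvBetterB (target p q : Int) : Bool :=
  decide ((target - p).natAbs < (target - q).natAbs) ||
    (decide ((target - p).natAbs = (target - q).natAbs) && decide (p < q))

-- for p in F: if better(p, best): best = p   (`better` is a strict total order on the
-- distinct elements of the set, so the result is independent of the set's order)
def pvScan (target : Int) (best : Int) (F : List Int) : Int :=
  F.foldl (fun b p => if pvBetterB target p b then p else b) best

-- {p + k * t for p in frontier if p < target for k in (0, 1, 2)}
def pvStep (target t : Int) (F : PySem.Set Int) : PySem.Set Int :=
  PySem.Set.ofList ((F.filter (fun p => decide (p < target))).flatMap (fun p => [p, p + t, p + 2 * t]))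

def closestCost2_alt (baseCosts : List Int) (toppingCosts : List Int) (target : Int) : Int :=
  match baseCosts with
  | [] => 0  -- unreachable under Pre_: Python raises IndexError on baseCosts[0]
  | b0 :: _ =>
    let F0 : PySem.Set Int := PySem.Set.ofList baseCosts
    let best0 := pvScan target b0 F0
    (toppingCosts.foldl
      (fun (st : Int × PySem.Set Int) t =>
        let F := pvStep target t st.2
        (pvScan target st.1 F, F))
      (best0, F0)).1

-- ===== PRECONDITION & SPEC =====
-- Pre_ excludes only baseCosts = [], where Python A raises IndexError on baseCosts[0].
def Pre_closestCost2 (baseCosts : List Int) (toppingCosts : List Int) (target : Int) : Prop :=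
  baseCosts ≠ []
instance (baseCosts : List Int) (toppingCosts : List Int) (target : Int) : Decidable (Pre_closestCost2 baseCosts toppingCosts target) := by unfold Pre_closestCost2; infer_instance
def pvWitness_closestCost2 : List Int × List Int × Int := ([1, 7], [3, 4], 10)

def Spec_closestCost2 (baseCosts : List Int) (toppingCosts : List Int) (target : Int) (out : Int) : Prop := out = closestCost2_alt baseCosts toppingCosts target
instance (baseCosts : List Int) (toppingCosts : List Int) (target : Int) (out : Int) : Decidable (Spec_closestCost2 baseCosts toppingCosts target out) := by unfold Spec_closestCost2; infer_instance

-- ===== CLAIM (what is proved, stated in full; the proofs are below) =====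
def Claim_equal_closestCost2 : Prop := ∀ (baseCosts : List Int) (toppingCosts : List Int) (target : Int), Dom_closestCost2 baseCosts toppingCosts target → Pre_closestCost2 baseCosts toppingCosts target → Spec_closestCost2 baseCosts toppingCosts target (closestCost2 baseCosts toppingCosts target)

-- ===== LEMMAS AND PROOFS =====

-- the list of prices at which A's helper tests res, in A's visiting order
def pvVisited (tgt : Int) : List Int → Int → List Int
  | ts, price =>
    price :: (match ts with
      | [] => []
      | t :: ts' =>
        if price ≥ tgt then []
        else pvVisited tgt ts' price ++ pvVisited tgt ts' (price + t) ++ pvVisited tgt ts' (price + t * 2))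

-- the concatenation of B's frontier levels after the initial one
def pvLevels (tgt : Int) : List Int → PySem.Set Int → List Int
  | [], _ => []
  | t :: ts', F => (pvStep tgt t F : List Int) ++ pvLevels tgt ts' (pvStep tgt t F)

-- ---- order facts about pvBetterB ----
lemma pvBetterB_irrefl (t p : Int) : pvBetterB t p p = false := by
  simp [pvBetterB]

lemma pvBetterB_antisymm (t p q : Int) (h1 : pvBetterB t p q = false) (h2 : pvBetterB t q p = false) : p = q := by
  simp [pvBetterB] at h1 h2; omega

lemma pvBetterB_notbetter_trans (t a b c : Int) (h1 : pvBetterB t a b = false) (h2 : pvBetterB t b c = false) : pvBetterB t a c = false := by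
  simp only [pvBetterB, Bool.or_eq_false_iff, Bool.and_eq_false_iff, decide_eq_false_iff_not] at h1 h2 ⊢
  omega

-- A's update equals B's update as a value (at equal distance, price < target ↔ price < res)
lemma pv_upd_eq (t p r : Int) :
    (if pvBetterA t p r then p else r) = (if pvBetterB t p r then p else r) := by
  by_cases hpr : p = r
  · subst hpr; split_ifs <;> rfl
  · simp only [pvBetterA, pvBetterB]
    split_ifs with h1 h2 h2 <;> first | rfl | (exfalso; simp only [Bool.or_eq_true, Bool.and_eq_true, decide_eq_true_eq] at h1 h2; omega)

-- ---- pvScan: membership, minimality, invariance under same membership ----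
lemma pvScan_mem (t : Int) (l : List Int) (b : Int) :
    pvScan t b l = b ∨ pvScan t b l ∈ l := by
  induction l generalizing b with
  | nil => left; rfl
  | cons a l ih =>
    have hc : pvScan t b (a :: l) = pvScan t (if pvBetterB t a b then a else b) l := by
      simp [pvScan]
    rw [hc]
    by_cases hb : pvBetterB t a b = true
    · rw [if_pos hb]
      rcases ih a with h | h
      · right; rw [h]; exact List.mem_cons_self
      · right; exact List.mem_cons_of_mem _ h
    · rw [if_neg hb]
      rcases ih b with h | h
      · left; exact h
      · right; exact List.mem_cons_of_mem _ h

lemma pvScan_min (t : Int) (l : List Int) (b : Int) :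
    ∀ x, (x = b ∨ x ∈ l) → pvBetterB t x (pvScan t b l) = false := by
  induction l generalizing b with
  | nil =>
    intro x hx
    rcases hx with rfl | h
    · simpa [pvScan] using pvBetterB_irrefl t x
    · simp at h
  | cons a l ih =>
    intro x hx
    have hstep : ∀ y, (y = b ∨ y = a) → pvBetterB t y (if pvBetterB t a b then a else b) = false := by
      intro y hy
      rcases hy with rfl | rfl
      · split_ifs with hb
        · cases hba : pvBetterB t y a with
          | false => rfl
          | true =>
            exfalso
            simp only [pvBetterB, Bool.or_eq_true, Bool.and_eq_true, decide_eq_true_eq] at hb hba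
            omega
        · exact pvBetterB_irrefl t y
      · split_ifs with hb
        · exact pvBetterB_irrefl t y
        · simpa using hb
    have hres : pvBetterB t (if pvBetterB t a b then a else b)
        (pvScan t (if pvBetterB t a b then a else b) l) = false :=
      ih (if pvBetterB t a b then a else b) _ (Or.inl rfl)
    simp only [pvScan, List.foldl_cons] at *
    rcases hx with rfl | hx
    · exact pvBetterB_notbetter_trans t x _ _ (hstep x (Or.inl rfl)) hres
    · rcases List.mem_cons.mp hx with rfl | hx
      · exact pvBetterB_notbetter_trans t x _ _ (hstep x (Or.inr rfl)) hres
      · exact ih (if pvBetterB t a b then a else b) x (Or.inr hx)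

lemma pvScan_eq_of_mem_iff (t b : Int) (l1 l2 : List Int)
    (h : ∀ x, x ∈ l1 ↔ x ∈ l2) : pvScan t b l1 = pvScan t b l2 := by
  have m1 := pvScan_mem t l1 b
  have m2 := pvScan_mem t l2 b
  apply pvBetterB_antisymm t _ _
  · apply pvScan_min t l2 b
    rcases m1 with h1 | h1
    · exact Or.inl h1
    · exact Or.inr ((h _).mp h1)
  · apply pvScan_min t l1 b
    rcases m2 with h2 | h2
    · exact Or.inl h2
    · exact Or.inr ((h _).mpr h2)

lemma pvScan_append (t b : Int) (l1 l2 : List Int) :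
    pvScan t b (l1 ++ l2) = pvScan t (pvScan t b l1) l2 := by
  simp [pvScan, List.foldl_append]

-- ---- A's helper computes pvScan over its visited list ----
lemma pvHelperA_eq (tgt : Int) (ts : List Int) (price res : Int) :
    pvHelperA tgt ts price res = pvScan tgt res (pvVisited tgt ts price) := by
  induction ts generalizing price res with
  | nil =>
    simp only [pvHelperA, pvVisited, pvScan, List.foldl_cons, List.foldl_nil]
    exact pv_upd_eq tgt price res
  | cons a ts ih =>
    by_cases h : price ≥ tgt
    · simp only [pvHelperA, pvVisited, if_pos h, pvScan, List.foldl_cons, List.foldl_nil]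
      exact pv_upd_eq tgt price res
    · simp only [pvHelperA, pvVisited, if_neg h]
      have hcons : pvScan tgt res (price :: (pvVisited tgt ts price ++ pvVisited tgt ts (price + a) ++ pvVisited tgt ts (price + a * 2))) =
          pvScan tgt (pvScan tgt (pvScan tgt (if pvBetterB tgt price res then price else res) (pvVisited tgt ts price)) (pvVisited tgt ts (price + a))) (pvVisited tgt ts (price + a * 2)) := by
        simp [pvScan, List.foldl_append]
      rw [hcons, ih, ih, ih, pv_upd_eq]

lemma pvFoldBases_eq (tgt : Int) (ts : List Int) (bs : List Int) (b : Int) :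
    bs.foldl (fun res base => pvHelperA tgt ts base res) b
      = pvScan tgt b (bs.flatMap (pvVisited tgt ts)) := by
  induction bs generalizing b with
  | nil => simp [pvScan]
  | cons a bs ih =>
    simp only [List.foldl_cons, List.flatMap_cons, pvScan_append]
    rw [ih, pvHelperA_eq]

-- ---- B's loop computes pvScan over the concatenated levels ----
lemma pvFoldLevels_eq (tgt : Int) (ts : List Int) (best : Int) (F : PySem.Set Int) :
    (ts.foldl (fun (st : Int × PySem.Set Int) t =>
        let F' := pvStep tgt t st.2
        (pvScan tgt st.1 F', F')) (best, F)).1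
      = pvScan tgt best (pvLevels tgt ts F) := by
  induction ts generalizing best F with
  | nil => simp [pvLevels, pvScan]
  | cons a ts ih =>
    simp only [List.foldl_cons, pvLevels, pvScan_append]
    exact ih (pvScan tgt best (pvStep tgt a F)) (pvStep tgt a F)

-- ---- membership: B's levels reach exactly A's visited prices ----
lemma mem_pvStep (tgt t : Int) (F : PySem.Set Int) (r : Int) :
    r ∈ (pvStep tgt t F : List Int) ↔ ∃ q ∈ (F : List Int), q < tgt ∧ (r = q ∨ r = q + t ∨ r = q + 2 * t) := by
  simp only [pvStep, PySem.Set.mem_ofList, List.mem_flatMap, List.mem_filter, decide_eq_true_eq,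
    List.mem_cons, List.not_mem_nil, or_false]
  constructor
  · rintro ⟨q, ⟨hq, hlt⟩, hr⟩; exact ⟨q, hq, hlt, hr⟩
  · rintro ⟨q, hq, hlt, hr⟩; exact ⟨q, ⟨hq, hlt⟩, hr⟩

lemma mem_pvLevels (tgt : Int) (ts : List Int) (F : PySem.Set Int) (p : Int) :
    (p ∈ (F : List Int) ∨ p ∈ pvLevels tgt ts F) ↔ ∃ q ∈ (F : List Int), p ∈ pvVisited tgt ts q := by
  induction ts generalizing F with
  | nil =>
    simp only [pvLevels, List.not_mem_nil, or_false]
    constructor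
    · intro h; exact ⟨p, h, by rw [pvVisited]; exact List.mem_cons_self⟩
    · rintro ⟨q, hq, hv⟩
      rw [pvVisited] at hv
      rcases List.mem_cons.mp hv with rfl | hv
      · exact hq
      · simp at hv
  | cons a ts ih =>
    constructor
    · rintro (hF | hL)
      · exact ⟨p, hF, by rw [pvVisited]; exact List.mem_cons_self⟩
      · rw [pvLevels, List.mem_append] at hL
        have : p ∈ (pvStep tgt a F : List Int) ∨ p ∈ pvLevels tgt ts (pvStep tgt a F) := hL
        obtain ⟨r, hrF', hrv⟩ := (ih (pvStep tgt a F)).mp this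
        obtain ⟨q, hqF, hqlt, hr⟩ := (mem_pvStep tgt a F r).mp hrF'
        refine ⟨q, hqF, ?_⟩
        rw [pvVisited, if_neg (not_le.mpr hqlt)]
        refine List.mem_cons_of_mem _ ?_
        rcases hr with rfl | rfl | rfl
        · exact List.mem_append_left _ (List.mem_append_left _ hrv)
        · exact List.mem_append_left _ (List.mem_append_right _ hrv)
        · exact List.mem_append_right _ (by rw [show q + a * 2 = q + 2 * a by ring]; exact hrv)
    · rintro ⟨q, hqF, hpv⟩
      rw [pvVisited] at hpv
      rcases List.mem_cons.mp hpv with rfl | hrest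
      · exact Or.inl hqF
      · by_cases hq : q ≥ tgt
        · rw [if_pos hq] at hrest; simp at hrest
        · rw [if_neg hq, List.mem_append, List.mem_append] at hrest
          have hstep : ∀ r, (r = q ∨ r = q + a ∨ r = q + 2 * a) → r ∈ (pvStep tgt a F : List Int) := by
            intro r hr
            exact (mem_pvStep tgt a F r).mpr ⟨q, hqF, not_le.mp hq, hr⟩
          have : ∃ r ∈ (pvStep tgt a F : List Int), p ∈ pvVisited tgt ts r := by
            rcases hrest with (h | h) | h
            · exact ⟨q, hstep q (Or.inl rfl), h⟩
            · exact ⟨q + a, hstep _ (Or.inr (Or.inl rfl)), h⟩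
            · exact ⟨q + 2 * a, hstep _ (Or.inr (Or.inr rfl)), by rwa [show q + 2 * a = q + a * 2 by ring]⟩
          have := (ih (pvStep tgt a F)).mpr this
          right
          rw [pvLevels, List.mem_append]
          exact this

-- ===== VERDICT (by name: the statement is the Claim_ definition above) =====
theorem closestCost2_spec : Claim_equal_closestCost2 := by
  intro bs ts tgt _ hpre
  unfold Spec_closestCost2
  match bs with
  | [] => exact absurd rfl hpre
  | b0 :: rest =>
    show (b0 :: rest).foldl (fun res base => pvHelperA tgt ts base res) b0 = _
    rw [pvFoldBases_eq]
    show _ = (ts.foldl (fun (st : Int × PySem.Set Int) t =>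
        let F := pvStep tgt t st.2
        (pvScan tgt st.1 F, F))
        (pvScan tgt b0 (PySem.Set.ofList (b0 :: rest)), PySem.Set.ofList (b0 :: rest))).1
    rw [pvFoldLevels_eq, ← pvScan_append]
    apply pvScan_eq_of_mem_iff
    intro x
    rw [List.mem_append]
    rw [mem_pvLevels tgt ts (PySem.Set.ofList (b0 :: rest)) x]
    simp only [List.mem_flatMap, PySem.Set.mem_ofList]
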